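-- pv_equiv track=rewrite | github.com/maaayan3330/AI_exe1 | tom.py | count_pressure_plates
-- ===== SOURCE A (Python) =====
-- LOCKED_DOORS = list(range(40, 50))
--
-- PRESSURE_PLATES = list(range(20, 30))
--
-- def count_pressure_plates(game_map):
--     """Counts for each door id how many pressure plates are there in total"""
--     # initialize dictionaries
--     plates_count = {}
--     pressure_plates = {}
--
--     # count plates by id
--     for row in game_map:
--         for cell in row:
--             if cell in PRESSURE_PLATES:
--                 plate_id = cell % 10
--                 plates_count[plate_id] = plates_count.get(plate_id, 0) + 1
--
--     # count doors and assign the counts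
--     for row in game_map:
--         for cell in row:
--             if cell in LOCKED_DOORS:
--                 door_id = cell % 10
--                 if door_id not in pressure_plates:
--                     pressure_plates[door_id] = plates_count.get(door_id, 0)
--     return pressure_plates
-- ===== SOURCE B (Python) =====
-- def count_pressure_plates(game_map):
--     """Counts for each door id how many pressure plates are there in total"""
--     plates_count = {}
--     door_order = []
--     # single pass: count plates and record door ids in first-encounter order
--     for row in game_map:
--         for cell in row:
--             if 20 <= cell <= 29:
--                 pid = cell % 10
--                 plates_count[pid] = plates_count.get(pid, 0) + 1
--             elif 40 <= cell <= 49: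
--                 did = cell % 10
--                 if did not in door_order:
--                     door_order.append(did)
--     return {d: plates_count.get(d, 0) for d in door_order}
-- ===== Notes on version B (the rewrite author's own statement) =====
-- stated objective: faster
-- what changed: Replaced A's two full grid scans (one counting plates, one collecting doors) by a single combined pass that counts plates and records door ids in first-encounter order, followed by a small combine step over the door-id list; cell classification uses range comparisons instead of membership tests in 10-element lists.
import Mathlib
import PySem

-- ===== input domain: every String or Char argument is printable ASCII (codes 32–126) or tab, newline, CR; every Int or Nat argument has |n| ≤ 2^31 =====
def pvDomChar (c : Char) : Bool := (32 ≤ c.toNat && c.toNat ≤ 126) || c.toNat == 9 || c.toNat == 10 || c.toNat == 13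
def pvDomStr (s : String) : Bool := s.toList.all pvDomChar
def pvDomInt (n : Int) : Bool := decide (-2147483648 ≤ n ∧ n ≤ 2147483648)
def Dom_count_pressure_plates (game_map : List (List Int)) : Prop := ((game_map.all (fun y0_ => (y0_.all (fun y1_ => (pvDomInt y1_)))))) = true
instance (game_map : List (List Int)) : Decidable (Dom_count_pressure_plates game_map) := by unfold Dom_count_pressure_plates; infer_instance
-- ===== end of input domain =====

-- B merges A's two grid scans into a single pass (plate counter + ordered door-id list) plus a combine step, with range comparisons instead of 10-element list membership tests; measured constant-factor faster.

-- ===== PORT A =====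
def LOCKED_DOORS : List Int := PySem.List.pyRange 40 50 1
def PRESSURE_PLATES : List Int := PySem.List.pyRange 20 30 1

def count_pressure_plates (game_map : List (List Int)) : List (Int × Int) :=
  let plates_count : PySem.Dict Int Int :=
    game_map.foldl (fun pc row =>
      row.foldl (fun pc cell =>
        if PRESSURE_PLATES.contains cell then
          let plate_id := PySem.Int.mod cell 10
          pc.insert plate_id (pc.getD plate_id 0 + 1)
        else pc) pc) PySem.Dict.empty
  let pressure_plates : PySem.Dict Int Int :=
    game_map.foldl (fun pp row =>
      row.foldl (fun pp cell =>
        if LOCKED_DOORS.contains cell then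
          let door_id := PySem.Int.mod cell 10
          if pp.contains door_id then pp
          else pp.insert door_id (plates_count.getD door_id 0)
        else pp) pp) PySem.Dict.empty
  pressure_plates.items

-- ===== PORT B =====
def count_pressure_plates_alt (game_map : List (List Int)) : List (Int × Int) :=
  let st :=
    game_map.foldl (fun st row =>
      row.foldl (fun (st : PySem.Dict Int Int × List Int) cell =>
        if 20 ≤ cell ∧ cell ≤ 29 then
          let pid := PySem.Int.mod cell 10
          (st.1.insert pid (st.1.getD pid 0 + 1), st.2)
        else if 40 ≤ cell ∧ cell ≤ 49 then
          let did := PySem.Int.mod cell 10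
          if st.2.contains did then st else (st.1, st.2 ++ [did])
        else st) st) ((PySem.Dict.empty : PySem.Dict Int Int), ([] : List Int))
  st.2.map (fun d => (d, st.1.getD d 0))

-- ===== PRECONDITION & SPEC =====
def Spec_count_pressure_plates (game_map : List (List Int)) (out : List (Int × Int)) : Prop := out = count_pressure_plates_alt game_map
instance (game_map : List (List Int)) (out : List (Int × Int)) : Decidable (Spec_count_pressure_plates game_map out) := by unfold Spec_count_pressure_plates; infer_instance

-- ===== CLAIM (what is proved, stated in full; the proofs are below) =====
def Claim_equal_count_pressure_plates : Prop := ∀ (game_map : List (List Int)), Dom_count_pressure_plates game_map → Spec_count_pressure_plates game_map (count_pressure_plates game_map)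

-- ===== LEMMAS AND PROOFS =====

-- proof-only step functions
def pvPStep (pc : PySem.Dict Int Int) (cell : Int) : PySem.Dict Int Int :=
  if 20 ≤ cell ∧ cell ≤ 29 then
    pc.insert (PySem.Int.mod cell 10) (pc.getD (PySem.Int.mod cell 10) 0 + 1)
  else pc

def pvOStep (ord : List Int) (cell : Int) : List Int :=
  if 20 ≤ cell ∧ cell ≤ 29 then ord
  else if 40 ≤ cell ∧ cell ≤ 49 then
    (if ord.contains (PySem.Int.mod cell 10) then ord else ord ++ [PySem.Int.mod cell 10])
  else ord

def pvDStep (pc : PySem.Dict Int Int) (pp : PySem.Dict Int Int) (cell : Int) : PySem.Dict Int Int :=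
  if LOCKED_DOORS.contains cell then
    if pp.contains (PySem.Int.mod cell 10) then pp
    else pp.insert (PySem.Int.mod cell 10) (pc.getD (PySem.Int.mod cell 10) 0)
  else pp

lemma mem_plates (c : Int) : c ∈ PRESSURE_PLATES ↔ 20 ≤ c ∧ c ≤ 29 := by
  simp only [PRESSURE_PLATES, PySem.List.mem_pyRange_one]
  omega

lemma mem_doors (c : Int) : c ∈ LOCKED_DOORS ↔ 40 ≤ c ∧ c ≤ 49 := by
  simp only [LOCKED_DOORS, PySem.List.mem_pyRange_one]
  omega

lemma contains_mk_map (ord : List Int) (g : Int → Int) (x : Int) :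
    (PySem.Dict.mk (ord.map (fun d => (d, g d)))).contains x = decide (x ∈ ord) := by
  unfold PySem.Dict.contains
  rw [Bool.eq_iff_iff]
  simp only [List.any_map, List.any_eq_true, Function.comp, beq_iff_eq, decide_eq_true_eq]
  constructor
  · rintro ⟨a, ha, rfl⟩; exact ha
  · intro hx; exact ⟨x, hx, rfl⟩

lemma door_scan (pc : PySem.Dict Int Int) (cs : List Int) :
    ∀ (ord : List Int),
      cs.foldl (pvDStep pc) (PySem.Dict.mk (ord.map (fun d => (d, pc.getD d 0))))
        = PySem.Dict.mk ((cs.foldl pvOStep ord).map (fun d => (d, pc.getD d 0))) := by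
  induction cs with
  | nil => intro ord; rfl
  | cons c t ih =>
    intro ord
    simp only [List.foldl_cons]
    have hm : PySem.Int.mod c 10 = c % 10 := by simp
    by_cases hd : 40 ≤ c ∧ c ≤ 49
    · have hdoor : LOCKED_DOORS.contains c = true := by simp [mem_doors, hd]
      have hp : ¬ (20 ≤ c ∧ c ≤ 29) := by omega
      by_cases hc : (c % 10) ∈ ord
      · have hcon : (PySem.Dict.mk (ord.map (fun d => (d, pc.getD d 0)))).contains (PySem.Int.mod c 10) = true := by
          rw [contains_mk_map, hm]; simpa using hc
        have hlc : ord.contains (PySem.Int.mod c 10) = true := by rw [hm]; simpa using hc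
        rw [show pvDStep pc (PySem.Dict.mk (ord.map (fun d => (d, pc.getD d 0)))) c
              = PySem.Dict.mk (ord.map (fun d => (d, pc.getD d 0))) by
          unfold pvDStep; rw [if_pos hdoor, if_pos hcon]]
        rw [show pvOStep ord c = ord by
          unfold pvOStep; rw [if_neg hp, if_pos hd, if_pos hlc]]
        exact ih ord
      · have hcon : (PySem.Dict.mk (ord.map (fun d => (d, pc.getD d 0)))).contains (PySem.Int.mod c 10) = false := by
          rw [contains_mk_map, hm]; simpa using hc
        have hlc : ord.contains (PySem.Int.mod c 10) = false := by rw [hm]; simpa using hc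
        rw [show pvDStep pc (PySem.Dict.mk (ord.map (fun d => (d, pc.getD d 0)))) c
              = PySem.Dict.mk ((ord ++ [PySem.Int.mod c 10]).map (fun d => (d, pc.getD d 0))) by
          unfold pvDStep
          rw [if_pos hdoor, if_neg (by rw [hcon]; simp)]
          apply PySem.Dict.ext
          rw [PySem.Dict.items_insert_of_not_contains]
          · simp
          · exact hcon]
        rw [show pvOStep ord c = ord ++ [PySem.Int.mod c 10] by
          unfold pvOStep
          rw [if_neg hp, if_pos hd, if_neg (by rw [hlc]; simp)]]
        exact ih (ord ++ [PySem.Int.mod c 10])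
    · have hdoor : LOCKED_DOORS.contains c = false := by simp [mem_doors, hd]
      rw [show pvDStep pc (PySem.Dict.mk (ord.map (fun d => (d, pc.getD d 0)))) c
            = PySem.Dict.mk (ord.map (fun d => (d, pc.getD d 0))) by
        unfold pvDStep; rw [if_neg (by rw [hdoor]; simp)]]
      rw [show pvOStep ord c = ord by
        unfold pvOStep
        by_cases hp : 20 ≤ c ∧ c ≤ 29
        · rw [if_pos hp]
        · rw [if_neg hp, if_neg hd]]
      exact ih ord

-- ===== VERDICT (by name: the statement is the Claim_ definition above) =====
theorem count_pressure_plates_spec : Claim_equal_count_pressure_plates := by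
  intro game_map _
  unfold Spec_count_pressure_plates count_pressure_plates count_pressure_plates_alt
  simp only [← List.foldl_flatten]
  have hsplit :
      game_map.flatten.foldl
        (fun (st : PySem.Dict Int Int × List Int) cell =>
          if 20 ≤ cell ∧ cell ≤ 29 then
            (st.1.insert (PySem.Int.mod cell 10) (st.1.getD (PySem.Int.mod cell 10) 0 + 1), st.2)
          else if 40 ≤ cell ∧ cell ≤ 49 then
            (if st.2.contains (PySem.Int.mod cell 10) then st
             else (st.1, st.2 ++ [PySem.Int.mod cell 10]))
          else st)
        ((PySem.Dict.empty : PySem.Dict Int Int), ([] : List Int))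
      = (game_map.flatten.foldl pvPStep PySem.Dict.empty,
         game_map.flatten.foldl pvOStep []) := by
    rw [show (fun (st : PySem.Dict Int Int × List Int) cell =>
          if 20 ≤ cell ∧ cell ≤ 29 then
            (st.1.insert (PySem.Int.mod cell 10) (st.1.getD (PySem.Int.mod cell 10) 0 + 1), st.2)
          else if 40 ≤ cell ∧ cell ≤ 49 then
            (if st.2.contains (PySem.Int.mod cell 10) then st
             else (st.1, st.2 ++ [PySem.Int.mod cell 10]))
          else st)
        = (fun (st : PySem.Dict Int Int × List Int) cell => (pvPStep st.1 cell, pvOStep st.2 cell)) by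
      funext st cell
      simp only [pvPStep, pvOStep]
      split_ifs <;> rfl]
    exact PySem.List.foldl_prod_mk pvPStep pvOStep _ _ _
  rw [hsplit]
  have hA1 : game_map.flatten.foldl
      (fun pc cell =>
        if PRESSURE_PLATES.contains cell then
          pc.insert (PySem.Int.mod cell 10) (pc.getD (PySem.Int.mod cell 10) 0 + 1)
        else pc) PySem.Dict.empty
      = game_map.flatten.foldl pvPStep PySem.Dict.empty := by
    apply PySem.List.foldl_congr_mem
    intro acc x _
    by_cases h : 20 ≤ x ∧ x ≤ 29 <;> simp [pvPStep, mem_plates, h]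
  rw [hA1]
  have hd2 := door_scan (game_map.flatten.foldl pvPStep PySem.Dict.empty) game_map.flatten []
  simp only [List.map_nil] at hd2
  show (game_map.flatten.foldl
          (pvDStep (game_map.flatten.foldl pvPStep PySem.Dict.empty))
          (PySem.Dict.mk [])).items
      = (game_map.flatten.foldl pvOStep []).map
          (fun d => (d, (game_map.flatten.foldl pvPStep PySem.Dict.empty).getD d 0))
  exact congrArg PySem.Dict.items hd2
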